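-- pv_equiv track=rewrite | github.com/elliott-fogg/connect_game | connect_solver.py | calculate_group_distance
-- ===== SOURCE A (Python) =====
-- GRID_SIZE = 15
--
-- def calculate_point_distance(point1, point2):
-- 	"""Calculate the number of intermediary points required to join two points."""
-- 	return abs(point1[0] - point2[0]) + abs(point1[1] - point2[1]) - 1
--
-- def calculate_permutation_distance(perm1, perm2):
-- 	"""Calculate the minimum distance between two permutations (individual
-- 	possible paths of a group). Return the minimum distance, plus an array of
-- 	the points (one from each path) that this distance could be achieved from."""
-- 	minimum_distance = GRID_SIZE**2
-- 	best_points = []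
-- 	for point1 in perm1:
-- 		for point2 in perm2:
-- 			dist = calculate_point_distance(point1, point2)
--
-- 			if dist < minimum_distance:
-- 				best_points = []
-- 				minimum_distance = dist
--
-- 			if dist == minimum_distance:
-- 				best_points.append(tuple(sorted([point1, point2])))
--
-- 	return (minimum_distance, best_points)
--
-- def calculate_group_distance(group1, group2):
-- 	"""Calculate the minimum distance between two groups (where a group is a
-- 	collection of permutations, or possible paths). Returns the minimum distance,
-- 	and a list of permutation combinations (one from each group) that match this
-- 	distance. The permutation combinations (as returned in the local variable
-- 	'valid_perms') are denoted as:
-- 	* Index-for-permutation-of-group1,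
-- 	* Index-for-permutation-of-group2,
-- 	* Array of possible best-points as returned from calculate_permutation_distance()"""
-- 	minimum_distance = GRID_SIZE**2
--
-- 	valid_perms = []
--
-- 	for i in range(len(group1)):
-- 		perm1 = group1[i]
-- 		for j in range(len(group2)):
-- 			perm2 = group2[j]
--
-- 			dist, best_points = calculate_permutation_distance(perm1, perm2)
--
-- 			if dist < minimum_distance:
-- 				valid_perms = []
-- 				minimum_distance = dist
--
-- 			if dist == minimum_distance:
-- 				valid_perms.append((i, j, best_points))
--
-- 	return (minimum_distance, valid_perms)
-- ===== SOURCE B (Python) =====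
-- GRID_SIZE = 15
--
-- def calculate_point_distance(point1, point2):
-- 	"""Calculate the number of intermediary points required to join two points."""
-- 	return abs(point1[0] - point2[0]) + abs(point1[1] - point2[1]) - 1
--
-- def calculate_permutation_distance(perm1, perm2):
-- 	"""Two-phase: materialise every point-pair's distance, take the min
-- 	(seeded with GRID_SIZE**2), then keep the pairs achieving it."""
-- 	pairs = [(calculate_point_distance(p1, p2), tuple(sorted([p1, p2])))
-- 	         for p1 in perm1 for p2 in perm2]
-- 	minimum_distance = min([GRID_SIZE**2] + [d for d, _ in pairs])
-- 	return (minimum_distance, [bp for d, bp in pairs if d == minimum_distance])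
--
-- def calculate_group_distance(group1, group2):
-- 	"""Two-phase: materialise every permutation pair's result, take the min
-- 	distance (seeded with GRID_SIZE**2), then filter the matching entries."""
-- 	results = [(i, j) + calculate_permutation_distance(p1, p2)
-- 	           for i, p1 in enumerate(group1) for j, p2 in enumerate(group2)]
-- 	minimum_distance = min([GRID_SIZE**2] + [d for _, _, d, _ in results])
-- 	return (minimum_distance,
-- 	        [(i, j, bp) for i, j, d, bp in results if d == minimum_distance])
-- ===== Notes on version B (the rewrite author's own statement) =====
-- stated objective: alternative
-- what changed: A tracks the running minimum in one pass, resetting its accumulator whenever a smaller distance appears; B materialises the full list of (distance, entry) results at both levels, takes the minimum in a second step (seeded with GRID_SIZE**2), and filters the entries achieving it in a third.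
import Mathlib
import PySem

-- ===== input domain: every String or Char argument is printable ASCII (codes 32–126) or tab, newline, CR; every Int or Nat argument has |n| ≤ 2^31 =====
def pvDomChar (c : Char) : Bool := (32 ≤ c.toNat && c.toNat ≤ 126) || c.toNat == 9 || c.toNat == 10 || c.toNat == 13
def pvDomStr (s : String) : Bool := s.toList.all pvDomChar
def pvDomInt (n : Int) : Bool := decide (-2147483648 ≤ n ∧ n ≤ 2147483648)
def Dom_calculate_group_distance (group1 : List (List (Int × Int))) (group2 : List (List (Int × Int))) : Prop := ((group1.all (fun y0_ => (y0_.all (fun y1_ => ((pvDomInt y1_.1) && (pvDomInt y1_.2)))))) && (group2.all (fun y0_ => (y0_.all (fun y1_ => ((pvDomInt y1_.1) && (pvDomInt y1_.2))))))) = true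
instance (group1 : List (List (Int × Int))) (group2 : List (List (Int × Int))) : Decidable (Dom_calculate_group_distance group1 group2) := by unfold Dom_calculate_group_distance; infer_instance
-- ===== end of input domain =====

-- B replaces A's single-pass minimum-tracking loops (which reset the accumulator whenever a
-- smaller distance appears) by a two-phase decomposition: materialise all (distance, entry)
-- results, take the minimum (seeded with GRID_SIZE**2), then filter the entries achieving it.
-- Objective: alternative decomposition, same asymptotic cost.

-- ===== PORT A =====
-- shared helper: Python's  tuple(sorted([point1, point2]))  on two (int, int) tuples —
-- exact port of sorted's lexicographic tuple comparison on a 2-element list (stable).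
def pvSortPair (a b : Int × Int) : (Int × Int) × (Int × Int) :=
  if b.1 < a.1 ∨ (b.1 = a.1 ∧ b.2 < a.2) then (b, a) else (a, b)

def calculate_point_distance (point1 point2 : Int × Int) : Int :=
  |point1.1 - point2.1| + |point1.2 - point2.2| - 1

def calculate_permutation_distance (perm1 perm2 : List (Int × Int)) :
    Int × List ((Int × Int) × (Int × Int)) :=
  perm1.foldl (fun s point1 =>
    perm2.foldl (fun s point2 =>
      let dist := calculate_point_distance point1 point2
      let s := if dist < s.1 then (dist, ([] : List ((Int × Int) × (Int × Int)))) else s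
      if dist = s.1 then (s.1, s.2 ++ [pvSortPair point1 point2]) else s) s)
    ((15 : Int) ^ 2, [])

-- 'for i in range(len(group1)): perm1 = group1[i]' is the enumeration of group1 (indices are
-- always in range), ported with PySem.List.enumerate; likewise the inner loop over group2.
def calculate_group_distance (group1 : List (List (Int × Int))) (group2 : List (List (Int × Int))) :
    Int × (List (Int × Int × (List ((Int × Int) × (Int × Int))))) :=
  (PySem.List.enumerate group1).foldl (fun s ip =>
    (PySem.List.enumerate group2).foldl (fun s jp =>
      let r := calculate_permutation_distance ip.2 jp.2
      let s := if r.1 < s.1 then (r.1, ([] : List (Int × Int × (List ((Int × Int) × (Int × Int)))))) else s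
      if r.1 = s.1 then (s.1, s.2 ++ [(ip.1, jp.1, r.2)]) else s) s)
    ((15 : Int) ^ 2, [])

-- ===== PORT B =====
-- Python's  min([GRID_SIZE**2] + ds)  on int lists is the left fold of min seeded with
-- GRID_SIZE**2 (exact: min keeps the first extremal element, identical for equal ints).
def calculate_permutation_distance_alt (perm1 perm2 : List (Int × Int)) :
    Int × List ((Int × Int) × (Int × Int)) :=
  let pairs := perm1.flatMap (fun p1 => perm2.map (fun p2 =>
      (calculate_point_distance p1 p2, pvSortPair p1 p2)))
  let minimum_distance := (pairs.map (·.1)).foldl min ((15 : Int) ^ 2)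
  (minimum_distance, (pairs.filter (fun pr => pr.1 = minimum_distance)).map (·.2))

def calculate_group_distance_alt (group1 : List (List (Int × Int))) (group2 : List (List (Int × Int))) :
    Int × (List (Int × Int × (List ((Int × Int) × (Int × Int))))) :=
  let results := (PySem.List.enumerate group1).flatMap (fun ip =>
      (PySem.List.enumerate group2).map (fun jp =>
        (ip.1, jp.1, calculate_permutation_distance_alt ip.2 jp.2)))
  let minimum_distance := (results.map (fun r => r.2.2.1)).foldl min ((15 : Int) ^ 2)
  (minimum_distance,
   (results.filter (fun r => r.2.2.1 = minimum_distance)).map (fun r => (r.1, r.2.1, r.2.2.2)))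

-- ===== PRECONDITION & SPEC =====
def Spec_calculate_group_distance (group1 : List (List (Int × Int))) (group2 : List (List (Int × Int))) (out : Int × (List (Int × Int × (List ((Int × Int) × (Int × Int)))))) : Prop := out = calculate_group_distance_alt group1 group2
instance (group1 : List (List (Int × Int))) (group2 : List (List (Int × Int))) (out : Int × (List (Int × Int × (List ((Int × Int) × (Int × Int)))))) : Decidable (Spec_calculate_group_distance group1 group2 out) := by
  unfold Spec_calculate_group_distance
  letI d3 : DecidableEq (Int × Int × List ((Int × Int) × Int × Int)) := inferInstance
  letI d4 : DecidableEq (List (Int × Int × List ((Int × Int) × Int × Int))) := List.hasDecEq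
  letI d5 : DecidableEq (Int × List (Int × Int × List ((Int × Int) × Int × Int))) := instDecidableEqProd
  exact d5 out (calculate_group_distance_alt group1 group2)

-- ===== CLAIM (what is proved, stated in full; the proofs are below) =====
def Claim_equal_calculate_group_distance : Prop := ∀ (group1 : List (List (Int × Int))) (group2 : List (List (Int × Int))), Dom_calculate_group_distance group1 group2 → Spec_calculate_group_distance group1 group2 (calculate_group_distance group1 group2)

-- ===== LEMMAS AND PROOFS =====

lemma pvFoldlMinLe (xs : List Int) : ∀ m : Int, xs.foldl min m ≤ m := by
  induction xs with
  | nil => intro m; simp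
  | cons x t ih =>
      intro m
      calc (x :: t).foldl min m = t.foldl min (min m x) := by simp
        _ ≤ min m x := ih _
        _ ≤ m := min_le_left _ _

-- the body of A's min-tracking loops, abstracted over the distance and entry of one element
def pvStep {γ δ : Type} (d : γ → Int) (e : γ → δ) (s : Int × List δ) (g : γ) : Int × List δ :=
  let s' := if d g < s.1 then (d g, ([] : List δ)) else s
  if d g = s'.1 then (s'.1, s'.2 ++ [e g]) else s'

-- A's min-tracking loop over a flat list, characterised: it returns the running minimum and
-- the entries of the elements achieving it (the incoming accumulator survives exactly when no
-- element improved on the incoming minimum).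
lemma pvLoopChar {γ δ : Type} (d : γ → Int) (e : γ → δ) :
    ∀ (xs : List γ) (m : Int) (acc : List δ),
      xs.foldl (pvStep d e) (m, acc)
      = ((xs.map d).foldl min m,
         (if (xs.map d).foldl min m = m then acc else []) ++
           (xs.filter (fun g => d g = (xs.map d).foldl min m)).map e) := by
  intro xs
  induction xs with
  | nil => intro m acc; simp
  | cons x t ih =>
      intro m acc
      rw [List.foldl_cons, List.map_cons, List.foldl_cons, List.filter_cons]
      by_cases h1 : d x < m
      · have hx : pvStep d e (m, acc) x = (d x, [e x]) := by
          unfold pvStep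
          rw [if_pos h1]
          simp
        have hmin : min m (d x) = d x := by omega
        rw [hx, ih (d x) [e x], hmin]
        have hle : (t.map d).foldl min (d x) ≤ d x := pvFoldlMinLe _ _
        have hne : ¬ (t.map d).foldl min (d x) = m := by omega
        rw [if_neg hne]
        by_cases h2 : d x = (t.map d).foldl min (d x)
        · rw [if_pos h2.symm, if_pos (decide_eq_true h2)]
          all_goals simp
        · rw [if_neg (fun h => h2 h.symm), if_neg (fun hh => absurd (of_decide_eq_true hh) h2)]
      · have hmin : min m (d x) = m := by omega
        rw [hmin]
        have hle : (t.map d).foldl min m ≤ m := pvFoldlMinLe _ _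
        by_cases h2 : d x = m
        · have hx : pvStep d e (m, acc) x = (m, acc ++ [e x]) := by
            unfold pvStep
            rw [if_neg h1]
            simp only []
            rw [if_pos h2]
          rw [hx, ih m (acc ++ [e x])]
          by_cases h3 : (t.map d).foldl min m = m
          · have h4 : d x = (t.map d).foldl min m := by omega
            rw [if_pos h3, if_pos h3, if_pos (decide_eq_true h4)]
            all_goals simp
          · have h4 : ¬ d x = (t.map d).foldl min m := by omega
            rw [if_neg h3, if_neg h3, if_neg (fun hh => absurd (of_decide_eq_true hh) h4)]
        · have hx : pvStep d e (m, acc) x = (m, acc) := by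
            unfold pvStep
            rw [if_neg h1]
            simp only []
            rw [if_neg h2]
          rw [hx, ih m acc]
          have h4 : ¬ d x = (t.map d).foldl min m := by omega
          rw [if_neg (fun hh => absurd (of_decide_eq_true hh) h4)]

-- nested loop over a pair of lists = single loop over the materialised product list
lemma pvFoldlFoldlFlatMap {α β σ : Type} (f : σ → α × β → σ) (ys : List β) :
    ∀ (xs : List α) (s : σ),
      xs.foldl (fun s x => ys.foldl (fun s y => f s (x, y)) s) s
      = (xs.flatMap (fun x => ys.map (fun y => (x, y)))).foldl f s := by
  intro xs
  induction xs with
  | nil => intro s; simp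
  | cons x t ih =>
      intro s
      rw [List.foldl_cons, List.flatMap_cons, List.foldl_append, List.foldl_map, ih]

-- distance and entry of one point pair, and the materialised product of two permutations
def pvD1 (g : (Int × Int) × (Int × Int)) : Int := calculate_point_distance g.1 g.2
def pvE1 (g : (Int × Int) × (Int × Int)) : (Int × Int) × (Int × Int) := pvSortPair g.1 g.2
def pvRes1 (perm1 perm2 : List (Int × Int)) : List ((Int × Int) × (Int × Int)) :=
  perm1.flatMap (fun p1 => perm2.map (fun p2 => (p1, p2)))

lemma permA_char (perm1 perm2 : List (Int × Int)) :
    calculate_permutation_distance perm1 perm2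
    = (((pvRes1 perm1 perm2).map pvD1).foldl min ((15 : Int) ^ 2),
       ((pvRes1 perm1 perm2).filter
          (fun g => pvD1 g = ((pvRes1 perm1 perm2).map pvD1).foldl min ((15 : Int) ^ 2))).map pvE1) := by
  have h0 : calculate_permutation_distance perm1 perm2
      = (pvRes1 perm1 perm2).foldl (pvStep pvD1 pvE1) ((15 : Int) ^ 2, []) := by
    unfold calculate_permutation_distance pvRes1
    exact pvFoldlFoldlFlatMap (pvStep pvD1 pvE1) perm2 perm1 _
  rw [h0, pvLoopChar pvD1 pvE1]
  simp

lemma permB_char (perm1 perm2 : List (Int × Int)) :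
    calculate_permutation_distance_alt perm1 perm2
    = (((pvRes1 perm1 perm2).map pvD1).foldl min ((15 : Int) ^ 2),
       ((pvRes1 perm1 perm2).filter
          (fun g => pvD1 g = ((pvRes1 perm1 perm2).map pvD1).foldl min ((15 : Int) ^ 2))).map pvE1) := by
  unfold calculate_permutation_distance_alt
  have hpairs : perm1.flatMap (fun p1 => perm2.map (fun p2 =>
        (calculate_point_distance p1 p2, pvSortPair p1 p2)))
      = (pvRes1 perm1 perm2).map (fun g => (pvD1 g, pvE1 g)) := by
    unfold pvRes1
    simp [List.map_flatMap, List.map_map, Function.comp_def, pvD1, pvE1]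
  rw [hpairs]
  simp only [List.map_map, List.filter_map, Function.comp_def]

lemma perm_equiv (perm1 perm2 : List (Int × Int)) :
    calculate_permutation_distance perm1 perm2 = calculate_permutation_distance_alt perm1 perm2 := by
  rw [permA_char, permB_char]

-- distance and entry contributed by one (enumerated) permutation pair
def pvD2 (g : (Int × List (Int × Int)) × (Int × List (Int × Int))) : Int :=
  (calculate_permutation_distance g.1.2 g.2.2).1
def pvE2 (g : (Int × List (Int × Int)) × (Int × List (Int × Int))) :
    Int × Int × List ((Int × Int) × (Int × Int)) :=
  (g.1.1, g.2.1, (calculate_permutation_distance g.1.2 g.2.2).2)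
def pvRes2 (group1 group2 : List (List (Int × Int))) :
    List ((Int × List (Int × Int)) × (Int × List (Int × Int))) :=
  (PySem.List.enumerate group1).flatMap
    (fun ip => (PySem.List.enumerate group2).map (fun jp => (ip, jp)))

lemma groupA_char (group1 group2 : List (List (Int × Int))) :
    calculate_group_distance group1 group2
    = (((pvRes2 group1 group2).map pvD2).foldl min ((15 : Int) ^ 2),
       ((pvRes2 group1 group2).filter
          (fun g => pvD2 g = ((pvRes2 group1 group2).map pvD2).foldl min ((15 : Int) ^ 2))).map pvE2) := by
  have h0 : calculate_group_distance group1 group2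
      = (pvRes2 group1 group2).foldl (pvStep pvD2 pvE2) ((15 : Int) ^ 2, []) := by
    unfold calculate_group_distance pvRes2
    exact pvFoldlFoldlFlatMap (pvStep pvD2 pvE2) (PySem.List.enumerate group2) (PySem.List.enumerate group1) _
  rw [h0, pvLoopChar pvD2 pvE2]
  simp

lemma groupB_char (group1 group2 : List (List (Int × Int))) :
    calculate_group_distance_alt group1 group2
    = (((pvRes2 group1 group2).map pvD2).foldl min ((15 : Int) ^ 2),
       ((pvRes2 group1 group2).filter
          (fun g => pvD2 g = ((pvRes2 group1 group2).map pvD2).foldl min ((15 : Int) ^ 2))).map pvE2) := by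
  unfold calculate_group_distance_alt
  have hres : (PySem.List.enumerate group1).flatMap (fun ip =>
        (PySem.List.enumerate group2).map (fun jp =>
          (ip.1, jp.1, calculate_permutation_distance_alt ip.2 jp.2)))
      = (pvRes2 group1 group2).map
          (fun g => (g.1.1, g.2.1, calculate_permutation_distance g.1.2 g.2.2)) := by
    unfold pvRes2
    simp [List.map_flatMap, List.map_map, Function.comp_def, perm_equiv]
  rw [hres]
  simp only [List.map_map, List.filter_map, Function.comp_def]
  all_goals rfl

-- ===== VERDICT (by name: the statement is the Claim_ definition above) =====
theorem calculate_group_distance_spec : Claim_equal_calculate_group_distance := by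
  intro group1 group2 _
  unfold Spec_calculate_group_distance
  rw [groupA_char, groupB_char]
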